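-- pv_equiv track=rewrite | github.com/Ion-Protocol/nucleus-boring-vault | lzConfigCheck.py | find_address_in_json
-- ===== SOURCE A (Python) =====
-- def find_address_in_json(addresses, json_data, searchKey=""):
--     results = []
--
--     for parent_key, parent_value in json_data.items():
--         for key, value in parent_value.items():
--             addresses = [a.lower() for a in addresses]
--             if value.lower() in addresses:
--                 results.append((parent_key, key, value))
--
--     if searchKey == "":
--         if len(results) == 1:
--             parent_key, key, value = results[0]
--             return True, key, parent_key
--         else:
--             return False, None, None
--     else:
--         for result in results:
--             parent_key, key, value = result
--             if key == searchKey: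
--                 return True, key, parent_key
--
--         return False, None, None
-- ===== SOURCE B (Python) =====
-- def find_address_in_json(addresses, json_data, searchKey=""):
--     lowered = [a.lower() for a in addresses]
--     if searchKey == "":
--         found = None
--         for parent_key, parent_value in json_data.items():
--             for key, value in parent_value.items():
--                 if value.lower() in lowered:
--                     if found is not None:
--                         return False, None, None
--                     found = (key, parent_key)
--         if found is not None:
--             return True, found[0], found[1]
--         return False, None, None
--     else:
--         for parent_key, parent_value in json_data.items():
--             for key, value in parent_value.items():
--                 if value.lower() in lowered and key == searchKey:
--                     return True, key, parent_key
--         return False, None, None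
-- ===== Notes on version B (the rewrite author's own statement) =====
-- stated objective: faster
-- what changed: B lowers the address list once and streams the nested dict in a single pass with early exit (count-and-save-first for empty searchKey, first-hit for a non-empty one), instead of A's re-lowering the address list on every inner iteration, materialising a full results list and scanning it afterwards.
import Mathlib
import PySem

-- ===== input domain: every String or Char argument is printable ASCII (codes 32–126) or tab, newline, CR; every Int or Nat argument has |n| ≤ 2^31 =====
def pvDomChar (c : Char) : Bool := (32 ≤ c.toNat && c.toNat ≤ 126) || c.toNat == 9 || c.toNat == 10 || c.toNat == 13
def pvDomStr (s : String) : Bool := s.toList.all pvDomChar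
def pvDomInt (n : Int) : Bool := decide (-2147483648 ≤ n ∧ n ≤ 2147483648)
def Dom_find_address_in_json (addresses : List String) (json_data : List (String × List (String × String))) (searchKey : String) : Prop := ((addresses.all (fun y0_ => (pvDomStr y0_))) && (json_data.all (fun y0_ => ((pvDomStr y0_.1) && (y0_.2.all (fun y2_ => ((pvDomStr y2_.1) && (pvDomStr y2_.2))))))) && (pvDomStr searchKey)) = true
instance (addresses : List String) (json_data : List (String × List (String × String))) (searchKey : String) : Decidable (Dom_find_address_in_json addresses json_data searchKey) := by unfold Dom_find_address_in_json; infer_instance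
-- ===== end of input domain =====

-- B lowers the addresses once and streams the nested dict in a single early-exit pass
-- instead of re-lowering the list per entry, building a results list and scanning it (objective: faster, constant factor).


-- ===== PORT A =====
-- the final 'for result in results' early-return loop of A
def pyScanA (results : List (String × String × String)) (searchKey : String) : Bool × Option String × Option String :=
  match results with
  | [] => (false, none, none)
  | (pk, k, _) :: rest =>
    if k = searchKey then (true, some k, some pk) else pyScanA rest searchKey

def find_address_in_json (addresses : List String) (json_data : List (String × List (String × String))) (searchKey : String) : Bool × Option String × Option String :=
  -- loop state: (addresses, results); A rebinds 'addresses' to its lowered copy inside the inner loop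
  let st := json_data.foldl (fun st pv =>
      pv.2.foldl (fun st kv =>
        let addrs := st.1.map PySem.Str.lower
        if addrs.contains (PySem.Str.lower kv.2) then (addrs, st.2 ++ [(pv.1, kv.1, kv.2)])
        else (addrs, st.2)) st)
    (addresses, ([] : List (String × String × String)))
  let results := st.2
  if searchKey = "" then
    if results.length = 1 then
      match PySem.List.pyGet? results 0 with
      | some (pk, k, _) => (true, some k, some pk)
      | none => (false, none, none)
    else (false, none, none)
  else pyScanA results searchKey

-- ===== PORT B =====
-- empty-searchKey pass: 'none' = a second match was seen (early return False), else the updated saved first match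
def bInner1 (lowered : List String) (pk : String) (found : Option (String × String)) (kvs : List (String × String)) : Option (Option (String × String)) :=
  match kvs with
  | [] => some found
  | (k, v) :: rest =>
    if lowered.contains (PySem.Str.lower v) then
      match found with
      | some _ => none
      | none => bInner1 lowered pk (some (k, pk)) rest
    else bInner1 lowered pk found rest

def bOuter1 (lowered : List String) (found : Option (String × String)) (json : List (String × List (String × String))) : Bool × Option String × Option String :=
  match json with
  | [] =>
    match found with
    | some (k, pk) => (true, some k, some pk)
    | none => (false, none, none)
  | (pk, kvs) :: rest =>
    match bInner1 lowered pk found kvs with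
    | none => (false, none, none)
    | some found' => bOuter1 lowered found' rest

-- non-empty searchKey pass: first entry matching both the address list and the key
def bInner2 (lowered : List String) (searchKey pk : String) (kvs : List (String × String)) : Option (Bool × Option String × Option String) :=
  match kvs with
  | [] => none
  | (k, v) :: rest =>
    if lowered.contains (PySem.Str.lower v) ∧ k = searchKey then some (true, some k, some pk)
    else bInner2 lowered searchKey pk rest

def bOuter2 (lowered : List String) (searchKey : String) (json : List (String × List (String × String))) : Bool × Option String × Option String :=
  match json with
  | [] => (false, none, none)
  | (pk, kvs) :: rest =>
    match bInner2 lowered searchKey pk kvs with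
    | some r => r
    | none => bOuter2 lowered searchKey rest

def find_address_in_json_alt (addresses : List String) (json_data : List (String × List (String × String))) (searchKey : String) : Bool × Option String × Option String :=
  let lowered := addresses.map PySem.Str.lower
  if searchKey = "" then bOuter1 lowered none json_data
  else bOuter2 lowered searchKey json_data

-- ===== PRECONDITION & SPEC =====
def Spec_find_address_in_json (addresses : List String) (json_data : List (String × List (String × String))) (searchKey : String) (out : Bool × Option String × Option String) : Prop := out = find_address_in_json_alt addresses json_data searchKey
instance (addresses : List String) (json_data : List (String × List (String × String))) (searchKey : String) (out : Bool × Option String × Option String) : Decidable (Spec_find_address_in_json addresses json_data searchKey out) := by unfold Spec_find_address_in_json; infer_instance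

-- ===== CLAIM (what is proved, stated in full; the proofs are below) =====
def Claim_equal_find_address_in_json : Prop := ∀ (addresses : List String) (json_data : List (String × List (String × String))) (searchKey : String), Dom_find_address_in_json addresses json_data searchKey → Spec_find_address_in_json addresses json_data searchKey (find_address_in_json addresses json_data searchKey)

-- ===== LEMMAS AND PROOFS =====

theorem char_le_iff_toNat (a b : Char) : a ≤ b ↔ a.toNat ≤ b.toNat := by
  rw [Char.le_def, UInt32.le_iff_toNat_le]; rfl

theorem lowerChar_idem (c : Char) : PySem.Chars.lowerChar (PySem.Chars.lowerChar c) = PySem.Chars.lowerChar c := by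
  simp only [PySem.Chars.lowerChar, PySem.Chars.isupper, Bool.and_eq_true, decide_eq_true_eq, char_le_iff_toNat] at *
  split_ifs with h1 h2 <;> try rfl
  exfalso
  obtain ⟨a, b⟩ := h1
  obtain ⟨d, e⟩ := h2
  have hz : ('Z' : Char).toNat = 90 := rfl
  have ha : ('A' : Char).toNat = 65 := rfl
  rw [hz] at b e
  rw [ha] at a d
  have hv : (c.toNat + 32).isValidChar := Or.inl (by omega)
  rw [Char.toNat_ofNat, if_pos hv] at d e
  omega

theorem chars_lower_idem (l : List Char) : PySem.Chars.lower (PySem.Chars.lower l) = PySem.Chars.lower l := by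
  simp only [PySem.Chars.lower, List.map_map]
  exact List.map_congr_left (fun c _ => lowerChar_idem c)

theorem str_lower_idem (s : String) : PySem.Str.lower (PySem.Str.lower s) = PySem.Str.lower s := by
  show String.ofList (PySem.Chars.lower (PySem.Str.lower s).toList) = PySem.Str.lower s
  rw [PySem.Str.toList_lower, chars_lower_idem]
  rfl

theorem map_lower_idem (l : List String) : (l.map PySem.Str.lower).map PySem.Str.lower = l.map PySem.Str.lower := by
  simp only [List.map_map]
  exact List.map_congr_left (fun s _ => str_lower_idem s)

-- the list of matched (parent_key, key, value) triples, lowered addresses given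
def matchesOf (lowered : List String) (json : List (String × List (String × String))) : List (String × String × String) :=
  json.flatMap (fun pv => (pv.2.filter (fun kv => lowered.contains (PySem.Str.lower kv.2))).map (fun kv => (pv.1, kv.1, kv.2)))

-- ---- A side: the nested fold builds exactly matchesOf ----

theorem innerA_eq (lowered : List String) (pk : String) (kvs : List (String × String)) :
    ∀ (addrs : List String) (acc : List (String × String × String)), addrs.map PySem.Str.lower = lowered →
    kvs.foldl (fun st kv =>
        let a := st.1.map PySem.Str.lower
        if a.contains (PySem.Str.lower kv.2) then (a, st.2 ++ [(pk, kv.1, kv.2)]) else (a, st.2))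
      (addrs, acc)
    = (if kvs = [] then addrs else lowered,
       acc ++ (kvs.filter (fun kv => lowered.contains (PySem.Str.lower kv.2))).map (fun kv => (pk, kv.1, kv.2))) := by
  induction kvs with
  | nil => intro addrs acc h; simp
  | cons kv rest ih =>
    intro addrs acc h
    simp only [List.foldl_cons, List.filter_cons]
    have hlow : lowered.map PySem.Str.lower = lowered := by rw [← h, map_lower_idem]
    by_cases hc : lowered.contains (PySem.Str.lower kv.2)
    · simp only [h, hc, if_true, reduceCtorEq, if_false]
      rw [ih lowered (acc ++ [(pk, kv.1, kv.2)]) hlow]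
      by_cases hr : rest = [] <;> simp [hr]
    · simp only [h, hc, if_false, reduceCtorEq]
      rw [ih lowered acc hlow]
      by_cases hr : rest = [] <;> simp [hr]

theorem outerA_eq (lowered : List String) (json : List (String × List (String × String))) :
    ∀ (addrs : List String) (acc : List (String × String × String)), addrs.map PySem.Str.lower = lowered →
    (json.foldl (fun st pv =>
        pv.2.foldl (fun st kv =>
          let a := st.1.map PySem.Str.lower
          if a.contains (PySem.Str.lower kv.2) then (a, st.2 ++ [(pv.1, kv.1, kv.2)]) else (a, st.2)) st)
      (addrs, acc)).2
    = acc ++ matchesOf lowered json := by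
  induction json with
  | nil => intro addrs acc h; simp [matchesOf]
  | cons pv rest ih =>
    intro addrs acc h
    simp only [List.foldl_cons]
    rw [innerA_eq lowered pv.1 pv.2 addrs acc h]
    have hlow : lowered.map PySem.Str.lower = lowered := by rw [← h, map_lower_idem]
    by_cases he : pv.2 = []
    · rw [if_pos he, ih addrs _ h]
      simp [matchesOf, he]
    · rw [if_neg he, ih lowered _ hlow]
      simp [matchesOf]

-- ---- B side, empty searchKey: bOuter1 is a stateful scan of matchesOf ----

def go1 (results : List (String × String × String)) (found : Option (String × String)) : Bool × Option String × Option String :=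
  match results with
  | [] =>
    match found with
    | some (k, pk) => (true, some k, some pk)
    | none => (false, none, none)
  | (pk, k, _) :: rest =>
    match found with
    | some _ => (false, none, none)
    | none => go1 rest (some (k, pk))

def step1 (results : List (String × String × String)) (found : Option (String × String)) : Option (Option (String × String)) :=
  match results with
  | [] => some found
  | (pk, k, _) :: rest =>
    match found with
    | some _ => none
    | none => step1 rest (some (k, pk))

theorem go1_append (xs ys : List (String × String × String)) :
    ∀ found, go1 (xs ++ ys) found =
      (match step1 xs found with
       | none => (false, none, none)
       | some f => go1 ys f) := by
  induction xs with
  | nil => intro found; simp [step1]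
  | cons x rest ih =>
    intro found
    obtain ⟨pk, k, v⟩ := x
    cases found with
    | some p => simp [go1, step1]
    | none => simp only [List.cons_append, go1, step1]; exact ih _

theorem inner1_eq (lowered : List String) (pk : String) (kvs : List (String × String)) :
    ∀ found, bInner1 lowered pk found kvs =
      step1 ((kvs.filter (fun kv => lowered.contains (PySem.Str.lower kv.2))).map (fun kv => (pk, kv.1, kv.2))) found := by
  induction kvs with
  | nil => intro found; simp [bInner1, step1]
  | cons kv rest ih =>
    intro found
    obtain ⟨k, v⟩ := kv
    simp only [bInner1, List.filter_cons]
    by_cases hc : lowered.contains (PySem.Str.lower v)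
    · simp only [hc, if_true, List.map_cons, step1]
      cases found with
      | some p => rfl
      | none => exact ih _
    · simp only [hc]
      exact ih found

theorem outer1_eq (lowered : List String) (json : List (String × List (String × String))) :
    ∀ found, bOuter1 lowered found json = go1 (matchesOf lowered json) found := by
  induction json with
  | nil => intro found; simp [bOuter1, matchesOf, go1]
  | cons pv rest ih =>
    intro found
    obtain ⟨pk, kvs⟩ := pv
    simp only [bOuter1, matchesOf, List.flatMap_cons]
    rw [go1_append, inner1_eq]
    cases h : step1 ((kvs.filter (fun kv => lowered.contains (PySem.Str.lower kv.2))).map (fun kv => (pk, kv.1, kv.2))) found with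
    | none => rfl
    | some f => simpa [matchesOf] using ih f

-- ---- B side, non-empty searchKey: bOuter2 is pyScanA on matchesOf ----

def scan2 (results : List (String × String × String)) (searchKey : String) : Option (Bool × Option String × Option String) :=
  match results with
  | [] => none
  | (pk, k, _) :: rest =>
    if k = searchKey then some (true, some k, some pk) else scan2 rest searchKey

theorem scanA_append (xs ys : List (String × String × String)) (sk : String) :
    pyScanA (xs ++ ys) sk = (scan2 xs sk).getD (pyScanA ys sk) := by
  induction xs with
  | nil => simp [scan2]
  | cons x rest ih =>
    obtain ⟨pk, k, v⟩ := x
    by_cases hk : k = sk <;> simp [pyScanA, scan2, hk, ih]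

theorem inner2_eq (lowered : List String) (sk pk : String) (kvs : List (String × String)) :
    bInner2 lowered sk pk kvs =
      scan2 ((kvs.filter (fun kv => lowered.contains (PySem.Str.lower kv.2))).map (fun kv => (pk, kv.1, kv.2))) sk := by
  induction kvs with
  | nil => simp [bInner2, scan2]
  | cons kv rest ih =>
    obtain ⟨k, v⟩ := kv
    by_cases hc : PySem.Str.lower v ∈ lowered <;> by_cases hk : k = sk <;>
      simp [bInner2, scan2, hc, hk, ih]

theorem outer2_eq (lowered : List String) (sk : String) (json : List (String × List (String × String))) :
    bOuter2 lowered sk json = pyScanA (matchesOf lowered json) sk := by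
  induction json with
  | nil => simp [bOuter2, matchesOf, pyScanA]
  | cons pv rest ih =>
    obtain ⟨pk, kvs⟩ := pv
    simp only [bOuter2, matchesOf, List.flatMap_cons]
    rw [scanA_append, inner2_eq]
    cases h : scan2 ((kvs.filter (fun kv => lowered.contains (PySem.Str.lower kv.2))).map (fun kv => (pk, kv.1, kv.2))) sk with
    | none => simpa [matchesOf] using ih
    | some r => simp

-- ===== VERDICT (by name: the statement is the Claim_ definition above) =====
theorem find_address_in_json_spec : Claim_equal_find_address_in_json := by
  intro addresses json_data searchKey _
  unfold Spec_find_address_in_json find_address_in_json find_address_in_json_alt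
  have hA := outerA_eq (addresses.map PySem.Str.lower) json_data addresses [] rfl
  simp only [hA, List.nil_append]
  by_cases hk : searchKey = ""
  · rw [if_pos hk, if_pos hk, outer1_eq]
    cases hm : matchesOf (addresses.map PySem.Str.lower) json_data with
    | nil => simp [go1]
    | cons x rest =>
      obtain ⟨pk, k, v⟩ := x
      cases rest with
      | nil => simp [go1, PySem.List.pyGet?, PySem.List.pyIdx?]
      | cons y rest' =>
        obtain ⟨pk', k', v'⟩ := y
        simp [go1, List.length_cons]
  · rw [if_neg hk, if_neg hk, outer2_eq]
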